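-- pv_equiv track=rewrite | github.com/classicwilly/classicwilly.github.io | tools/convert_cards.py | convert_content
-- ===== SOURCE A (Python) =====
-- def convert_content(body_text, dry_run=False):
--     # Find H2 headings (lines starting with '## ')
--     lines = body_text.splitlines(True)
--     out = []
--     i = 0
--     section_count = 0
--     while i < len(lines):
--         line = lines[i]
--         if line.lstrip().startswith('## '):
--             # capture this section
--             section_count += 1
--             title = line.strip()[3:].strip()
--             capture_name = f'section_{section_count}'
--             section_lines = [line]
--             i += 1
--             while i < len(lines) and not lines[i].lstrip().startswith('## '):
--                 section_lines.append(lines[i]); i += 1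
--
--             capture_block = []
--             # Use plain strings so Python doesn't try to interpret Liquid braces
--             capture_block.append("{% capture " + capture_name + " %}\n")
--             capture_block.extend(section_lines)
--             capture_block.append("{% endcapture %}\n")
--             # include: pass the capture variable as content (keep quotes safe)
--             safe_title = title.replace('"', "'")
--             include_line = '{% include card.html title="' + safe_title + '" content=' + capture_name + ' classes="checklist-card" %}\n'
--             capture_block.append(include_line)
--             out.extend(capture_block)
--         else:
--             out.append(line)
--             i += 1
--
--     return ''.join(out), section_count
-- ===== SOURCE B (Python) =====
-- def convert_content(body_text, dry_run=False):
--     # Pass 1: partition the lines into segments: a segment is a group starting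
--     # at an H2 line (flagged True) or a run of non-H2 lines (flagged False).
--     lines = body_text.splitlines(True)
--
--     def is_h2(l):
--         return l.lstrip().startswith('## ')
--
--     segs = []
--     rest = lines
--     while rest:
--         j = 1
--         while j < len(rest) and not is_h2(rest[j]):
--             j += 1
--         segs.append((is_h2(rest[0]), rest[:j]))
--         rest = rest[j:]
--
--     # Pass 2: render the segments.
--     out = []
--     count = 0
--     for is_sec, group in segs:
--         if is_sec:
--             count += 1
--             name = 'section_%d' % count
--             title = group[0].strip()[3:].strip()
--             out.append('{% capture ' + name + ' %}\n')
--             out.extend(group)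
--             out.append('{% endcapture %}\n')
--             out.append('{% include card.html title="' + title.replace('"', "'")
--                        + '" content=' + name + ' classes="checklist-card" %}\n')
--         else:
--             out.extend(group)
--     return ''.join(out), count
-- ===== Notes on version B (the rewrite author's own statement) =====
-- stated objective: alternative
-- what changed: A interleaves detection and output in one index-driven while loop with a nested inner while; B first partitions the lines into tagged segments (section groups vs passthrough runs) and then renders each segment in a separate pass.
import Mathlib
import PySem

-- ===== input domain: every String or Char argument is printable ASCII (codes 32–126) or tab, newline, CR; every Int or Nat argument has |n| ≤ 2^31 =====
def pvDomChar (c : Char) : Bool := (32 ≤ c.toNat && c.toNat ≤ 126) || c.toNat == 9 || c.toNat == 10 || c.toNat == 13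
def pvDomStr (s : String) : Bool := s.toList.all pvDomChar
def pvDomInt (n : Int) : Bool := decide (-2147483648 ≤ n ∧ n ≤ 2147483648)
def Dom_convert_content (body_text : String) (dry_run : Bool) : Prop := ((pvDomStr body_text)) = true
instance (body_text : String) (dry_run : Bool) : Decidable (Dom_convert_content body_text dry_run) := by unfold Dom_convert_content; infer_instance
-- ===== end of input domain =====

-- B partitions the lines into tagged segments first, then renders them in a second
-- pass (objective: alternative decomposition, same O(n) cost); return values proved equal.


-- ===== PORT A =====

-- body_text.splitlines(True) (keepends), hand-ported: exact on the Dom alphabet,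
-- whose only line breaks are '\n', '\r' and '\r\n'.
def pvSplitlinesKeep : List Char → List Char → List (List Char)
  | [], cur => if cur = [] then [] else [cur.reverse]
  | '\n' :: t, cur => (cur.reverse ++ ['\n']) :: pvSplitlinesKeep t []
  | '\r' :: '\n' :: t, cur => (cur.reverse ++ ['\r', '\n']) :: pvSplitlinesKeep t []
  | '\r' :: t, cur => (cur.reverse ++ ['\r']) :: pvSplitlinesKeep t []
  | c :: t, cur => pvSplitlinesKeep t (c :: cur)

-- line.lstrip().startswith('## ')
def pvIsH2 (l : List Char) : Bool :=
  PySem.Chars.startswith (PySem.Chars.lstrip l) "## ".toList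

-- the {% capture %} block a section renders to (shared shape; A builds it inline, B per segment)
def pvBlock (n : Int) (group : List (List Char)) : List (List Char) :=
  let name := "section_".toList ++ PySem.Int.toChars n
  let title := PySem.Chars.strip (PySem.Chars.slice (PySem.Chars.strip (group.headD [])) (some 3) none)
  ("{% capture ".toList ++ name ++ " %}\n".toList)
    :: group
    ++ ["{% endcapture %}\n".toList,
        "{% include card.html title=\"".toList
          ++ PySem.Chars.replace title "\"".toList "'".toList
          ++ "\" content=".toList ++ name ++ " classes=\"checklist-card\" %}\n".toList]

-- inner while of A: gather the section's non-H2 lines, return (section_lines after head, rest)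
def pvCollectA : List (List Char) → List (List Char) × List (List Char)
  | [] => ([], [])
  | l :: t =>
    if pvIsH2 l then ([], l :: t)
    else
      let p := pvCollectA t
      (l :: p.1, p.2)

theorem pvCollectA_snd_length_le (t : List (List Char)) : (pvCollectA t).2.length ≤ t.length := by
  induction t with
  | nil => simp [pvCollectA]
  | cons l t ih =>
    simp only [pvCollectA]
    split
    · simp
    · simpa using Nat.le_succ_of_le ih

-- outer while of A
def pvGoA : List (List Char) → Int → List (List Char) × Int
  | [], c => ([], c)
  | l :: t, c =>
    if pvIsH2 l then
      let p := pvCollectA t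
      let r := pvGoA p.2 (c + 1)
      (pvBlock (c + 1) (l :: p.1) ++ r.1, r.2)
    else
      let r := pvGoA t c
      (l :: r.1, r.2)
  termination_by ls _ => ls.length
  decreasing_by
  · exact Nat.lt_succ_of_le (pvCollectA_snd_length_le t)
  · simp

def convert_content (body_text : String) (dry_run : Bool) : String × Int :=
  let lines := pvSplitlinesKeep body_text.toList []
  let r := pvGoA lines 0
  (String.ofList (PySem.Chars.join [] r.1), r.2)

-- ===== PORT B =====

-- pass 1 of B: partition into segments, tagged is-section / passthrough
def pvSegments : List (List Char) → List (Bool × List (List Char))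
  | [] => []
  | l :: t =>
    (pvIsH2 l, l :: t.takeWhile (fun x => !pvIsH2 x))
      :: pvSegments (t.dropWhile (fun x => !pvIsH2 x))
  termination_by ls => ls.length
  decreasing_by
    exact Nat.lt_succ_of_le (t.length_dropWhile_le _)

-- pass 2 of B: the rendering for-loop, a fold over the segments
def pvRenderB (segs : List (Bool × List (List Char))) : List (List Char) × Int :=
  segs.foldl
    (fun acc seg =>
      if seg.1 then (acc.1 ++ pvBlock (acc.2 + 1) seg.2, acc.2 + 1)
      else (acc.1 ++ seg.2, acc.2))
    ([], 0)

def convert_content_alt (body_text : String) (dry_run : Bool) : String × Int :=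
  let lines := pvSplitlinesKeep body_text.toList []
  let r := pvRenderB (pvSegments lines)
  (String.ofList (PySem.Chars.join [] r.1), r.2)

-- ===== PRECONDITION & SPEC =====
def Spec_convert_content (body_text : String) (dry_run : Bool) (out : String × Int) : Prop := out = convert_content_alt body_text dry_run
instance (body_text : String) (dry_run : Bool) (out : String × Int) : Decidable (Spec_convert_content body_text dry_run out) := by unfold Spec_convert_content; infer_instance

-- ===== CLAIM (what is proved, stated in full; the proofs are below) =====
def Claim_equal_convert_content : Prop := ∀ (body_text : String) (dry_run : Bool), Dom_convert_content body_text dry_run → Spec_convert_content body_text dry_run (convert_content body_text dry_run)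

-- ===== LEMMAS AND PROOFS =====

-- recursive form of B's rendering fold
def pvRenderRec : List (Bool × List (List Char)) → Int → List (List Char) × Int
  | [], c => ([], c)
  | (true, g) :: rest, c =>
    let r := pvRenderRec rest (c + 1)
    (pvBlock (c + 1) g ++ r.1, r.2)
  | (false, g) :: rest, c =>
    let r := pvRenderRec rest c
    (g ++ r.1, r.2)

theorem pvRenderB_foldl (segs : List (Bool × List (List Char))) :
    ∀ (a : List (List Char)) (c : Int),
      segs.foldl
        (fun acc seg =>
          if seg.1 then (acc.1 ++ pvBlock (acc.2 + 1) seg.2, acc.2 + 1)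
          else (acc.1 ++ seg.2, acc.2))
        (a, c)
      = (a ++ (pvRenderRec segs c).1, (pvRenderRec segs c).2) := by
  induction segs with
  | nil => simp [pvRenderRec]
  | cons seg rest ih =>
    intro a c
    obtain ⟨b, g⟩ := seg
    cases b <;> simp [pvRenderRec, ih, List.append_assoc]

theorem pvCollectA_eq (t : List (List Char)) :
    pvCollectA t = (t.takeWhile (fun x => !pvIsH2 x), t.dropWhile (fun x => !pvIsH2 x)) := by
  induction t with
  | nil => simp [pvCollectA]
  | cons l t ih =>
    simp only [pvCollectA, List.takeWhile_cons, List.dropWhile_cons]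
    by_cases h : pvIsH2 l <;> simp [h, ih]

-- merging a leading non-H2 line into the first (passthrough) segment does not change the rendering
theorem pvRenderRec_merge (t : List (List Char)) (l : List Char) (c : Int) :
    pvRenderRec ((false, l :: t.takeWhile (fun x => !pvIsH2 x))
        :: pvSegments (t.dropWhile (fun x => !pvIsH2 x))) c
      = (l :: (pvRenderRec (pvSegments t) c).1, (pvRenderRec (pvSegments t) c).2) := by
  cases t with
  | nil => simp [pvRenderRec, pvSegments]
  | cons x t' =>
    by_cases h : pvIsH2 x
    · simp [h, pvRenderRec, pvSegments]
    · simp [pvSegments, h, pvRenderRec]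

theorem pvGoA_eq_render : ∀ (n : Nat) (ls : List (List Char)) (c : Int), ls.length ≤ n →
    pvGoA ls c = pvRenderRec (pvSegments ls) c := by
  intro n
  induction n with
  | zero =>
    intro ls c h
    have : ls = [] := List.eq_nil_of_length_eq_zero (Nat.le_zero.mp h)
    simp [this, pvGoA, pvSegments, pvRenderRec]
  | succ n ih =>
    intro ls c h
    cases ls with
    | nil => simp [pvGoA, pvSegments, pvRenderRec]
    | cons l t =>
      by_cases hl : pvIsH2 l
      · have hlen : (t.dropWhile (fun x => !pvIsH2 x)).length ≤ n := by
          have := t.length_dropWhile_le (fun x => !pvIsH2 x)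
          simp at h; omega
        simp only [pvGoA, hl, if_pos, pvCollectA_eq]
        rw [ih _ _ hlen]
        simp [pvSegments, hl, pvRenderRec]
      · have hlen : t.length ≤ n := by simp at h; omega
        have hl' : pvIsH2 l = false := by simp [hl]
        simp only [pvGoA, hl]
        rw [if_neg (by simp [hl]), ih _ _ hlen, pvSegments, hl', pvRenderRec_merge]

-- ===== VERDICT (by name: the statement is the Claim_ definition above) =====
theorem convert_content_spec : Claim_equal_convert_content := by
  intro body_text dry_run _
  unfold Spec_convert_content convert_content convert_content_alt pvRenderB
  dsimp only
  rw [pvGoA_eq_render (pvSplitlinesKeep body_text.toList []).length _ _ le_rfl,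
      pvRenderB_foldl]
  simp
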